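-- pv_equiv track=rewrite | github.com/sunyiwei24601/Information-Retrieval-Projects | project1_part/tokenizer.py | email_tokenier
-- ===== SOURCE A (Python) =====
-- def email_tokenier(word):
--     tokens = word.split("@")
--     if len(tokens) <= 2:
--         return [word]
--     else:
--         res = []
--         for i in range(len(tokens)-1):
--             mid = ["." for j in range(len(tokens) - 1)]
--             mid[i] = "@"
--             s = ""
--             for j in range(len(mid)):
--                 s += tokens[j]
--                 s += mid[j]
--             s += tokens[-1]
--             res.append(s)
--         return res
-- ===== SOURCE B (Python) =====
-- def email_tokenier(word):
--     tokens = word.split("@")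
--     if len(tokens) <= 2:
--         return [word]
--     return _variants(tokens)
--
-- def _variants(ts):
--     if len(ts) <= 1:
--         return []
--     head, rest = ts[0], ts[1:]
--     return [head + "@" + ".".join(rest)] + [head + "." + v for v in _variants(rest)]
-- ===== Notes on version B (the rewrite author's own statement) =====
-- stated objective: simpler
-- what changed: Replaces A's nested index loops (per-variant separator list mid with mid[i]='@', then an indexed interleaving loop) by a direct recursion on the token list: variant 0 is head+'@'+'.'.join(rest), the remaining variants are head+'.' prefixed to the variants of the tail.
import Mathlib
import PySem

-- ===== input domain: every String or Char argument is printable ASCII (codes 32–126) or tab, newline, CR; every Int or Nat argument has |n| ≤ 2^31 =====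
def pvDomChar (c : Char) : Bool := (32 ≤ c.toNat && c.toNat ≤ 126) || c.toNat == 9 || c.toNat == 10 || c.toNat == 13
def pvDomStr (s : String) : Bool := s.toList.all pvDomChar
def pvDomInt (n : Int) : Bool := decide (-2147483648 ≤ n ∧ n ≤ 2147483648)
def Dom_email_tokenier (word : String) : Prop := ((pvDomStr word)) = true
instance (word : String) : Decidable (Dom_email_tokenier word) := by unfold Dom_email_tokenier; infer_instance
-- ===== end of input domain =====

-- B replaces A's nested index loops (per-variant separator list mid, indexed interleaving) by a
-- direct recursion on the token list; objective: simpler (same cost, no speed claim).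

-- ===== PORT A =====
-- word.split("@") with the non-empty literal separator "@": Chars.splitOn is the sep ≠ "" form.
-- mid[i] = "@" (i from range(len(tokens)-1), always in range) → pySetD;
-- tokens[-1] (split never returns an empty list, so always in range) → pyGetD.
def email_tokenier (word : String) : List String :=
  let tokens := (PySem.Chars.splitOn word.toList "@".toList).map String.ofList
  if tokens.length ≤ 2 then [word]
  else
    (PySem.List.pyRange 0 ((tokens.length : Int) - 1) 1).foldl (fun res i =>
      let mid := (PySem.List.pyRange 0 ((tokens.length : Int) - 1) 1).map (fun _ => ".")
      let mid := PySem.List.pySetD mid i "@"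
      let s := (PySem.List.pyRange 0 ((mid.length : Int)) 1).foldl (fun s j =>
        (s ++ PySem.List.pyGetD tokens j "") ++ PySem.List.pyGetD mid j "") ""
      let s := s ++ PySem.List.pyGetD tokens (-1) ""
      res ++ [s]) []

-- ===== PORT B =====
-- _variants from Source B: recursion on the token list.
def altVariants : List String → List String
  | [] => []
  | [_] => []
  | t :: r :: rs =>
    (t ++ "@" ++ PySem.Str.join "." (r :: rs)) ::
      (altVariants (r :: rs)).map (fun v => t ++ "." ++ v)

def email_tokenier_alt (word : String) : List String :=
  let tokens := (PySem.Chars.splitOn word.toList "@".toList).map String.ofList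
  if tokens.length ≤ 2 then [word]
  else altVariants tokens

-- ===== PRECONDITION & SPEC =====
def Spec_email_tokenier (word : String) (out : List String) : Prop := out = email_tokenier_alt word
instance (word : String) (out : List String) : Decidable (Spec_email_tokenier word out) := by unfold Spec_email_tokenier; infer_instance

-- ===== CLAIM (what is proved, stated in full; the proofs are below) =====
def Claim_equal_email_tokenier : Prop := ∀ (word : String), Dom_email_tokenier word → Spec_email_tokenier word (email_tokenier word)

-- ===== LEMMAS AND PROOFS =====

-- the closed form both proofs meet at: the variant with '@' at separator i
def cfVariant (ts : List String) (i : Nat) : String :=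
  PySem.Str.join "." (ts.take (i+1)) ++ "@" ++ PySem.Str.join "." (ts.drop (i+1))
lemma cfVariant_cons_succ (t r : String) (rs : List String) (i : Nat) :
    cfVariant (t :: r :: rs) (i+1) = t ++ "." ++ cfVariant (r :: rs) i := by
  apply String.toList_inj.mp
  rcases h : rs.take i with _ | ⟨q, qs⟩ <;>
    simp [cfVariant, PySem.Str.toList_join, List.take_succ_cons, h,
      PySem.Chars.join_cons_cons, PySem.Chars.join_singleton]
lemma altVariants_eq : ∀ (ts : List String),
    altVariants ts = (List.range (ts.length - 1)).map (cfVariant ts)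
  | [] => by simp [altVariants]
  | [_] => by simp [altVariants]
  | t :: r :: rs => by
    rw [altVariants, altVariants_eq (r :: rs)]
    have hlen : (t :: r :: rs).length - 1 = ((r :: rs).length - 1) + 1 := by simp
    rw [hlen, List.range_succ_eq_map]
    simp only [List.map_cons, List.map_map]
    refine congrArg₂ (· :: ·) ?_ ?_
    · apply String.toList_inj.mp
      simp [cfVariant, PySem.Str.toList_join, PySem.Chars.join_singleton]
    · refine List.map_congr_left (fun i _ => ?_)
      simp [Function.comp, cfVariant_cons_succ]

lemma shiftFold (g : Nat → String) (n : Nat) (acc : String) :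
    (List.range (n+1)).foldl (fun s j => s ++ g j) acc
      = (List.range n).foldl (fun s j => s ++ g (j+1)) (acc ++ g 0) := by
  rw [List.range_succ_eq_map]; simp [List.foldl_map]
lemma dotFold : ∀ (ts : List String) (acc : String), ts ≠ [] →
    (List.range (ts.length - 1)).foldl (fun s j => s ++ (ts.getD j "" ++ ".")) acc
        ++ ts.getD (ts.length - 1) ""
      = acc ++ PySem.Str.join "." ts
  | [], _, h => absurd rfl h
  | [t], acc, _ => by
    apply String.toList_inj.mp
    simp [PySem.Str.toList_join, PySem.Chars.join_singleton]
  | t :: r :: rs, acc, _ => by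
    have hlen : (t :: r :: rs).length - 1 = ((r :: rs).length - 1) + 1 := by simp
    rw [hlen, shiftFold]
    simp only [List.getD_cons_succ, List.getD_cons_zero]
    rw [dotFold (r :: rs) (acc ++ (t ++ ".")) (by simp)]
    apply String.toList_inj.mp
    rcases rs with _ | ⟨q, qs⟩ <;>
      simp [PySem.Str.toList_join, PySem.Chars.join_cons_cons, PySem.Chars.join_singleton]

lemma coreFold : ∀ (k : Nat) (ts : List String) (acc : String), ts ≠ [] → k < ts.length - 1 →
    (List.range (ts.length - 1)).foldl
        (fun s j => s ++ (ts.getD j "" ++ (if j = k then "@" else "."))) acc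
        ++ ts.getD (ts.length - 1) ""
      = acc ++ cfVariant ts k
  | 0, [], _, h, _ => absurd rfl h
  | 0, [t], _, _, hk => by simp at hk
  | 0, t :: r :: rs, acc, _, _ => by
    have hlen : (t :: r :: rs).length - 1 = ((r :: rs).length - 1) + 1 := by simp
    rw [hlen, shiftFold]
    simp only [List.getD_cons_succ, List.getD_cons_zero, Nat.succ_ne_zero, reduceIte]
    rw [dotFold (r :: rs) (acc ++ (t ++ "@")) (by simp)]
    apply String.toList_inj.mp
    simp [cfVariant, PySem.Str.toList_join, PySem.Chars.join_singleton]
  | (k+1), [], _, h, _ => absurd rfl h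
  | (k+1), [t], _, _, hk => by simp at hk
  | (k+1), t :: r :: rs, acc, _, hk => by
    have hlen : (t :: r :: rs).length - 1 = ((r :: rs).length - 1) + 1 := by simp
    rw [hlen, shiftFold]
    simp only [List.getD_cons_succ, List.getD_cons_zero, Nat.add_left_inj]
    rw [if_neg (by omega : ¬ (0 = k+1))]
    rw [coreFold k (r :: rs) (acc ++ (t ++ ".")) (by simp) (by simp at hk ⊢; omega)]
    rw [cfVariant_cons_succ]
    simp [String.append_assoc]

lemma midGetD (n k : Nat) (hk : k < n) (j : Nat) (hj : j < n) :
    ((List.replicate n ".").set k "@").getD j "" = (if j = k then "@" else ".") := by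
  by_cases h : j = k <;>
    simp [List.getD_eq_getElem?_getD, h, hj, hk, List.getElem_set_ne, Ne.symm]

lemma pyGetD_neg_one (ts : List String) (h : ts ≠ []) :
    PySem.List.pyGetD ts (-1) "" = ts.getD (ts.length - 1) "" := by
  have hl : 1 ≤ ts.length := List.length_pos_iff.mpr h
  rw [PySem.List.pyGetD,
    PySem.List.pyGet?_neg (xs := ts) (i := -1) (by norm_num) (by omega)]
  simp [List.getD_eq_getElem?_getD]

lemma outer_eq (ts : List String) (h3 : 2 < ts.length) :
    (PySem.List.pyRange 0 ((ts.length : Int) - 1) 1).foldl (fun res i =>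
      let mid := (PySem.List.pyRange 0 ((ts.length : Int) - 1) 1).map (fun _ => ".")
      let mid := PySem.List.pySetD mid i "@"
      let s := (PySem.List.pyRange 0 ((mid.length : Int)) 1).foldl (fun s j =>
        (s ++ PySem.List.pyGetD ts j "") ++ PySem.List.pyGetD mid j "") ""
      let s := s ++ PySem.List.pyGetD ts (-1) ""
      res ++ [s]) []
    = altVariants ts := by
  have hts : ts ≠ [] := by rintro rfl; simp at h3
  have hcast : ((ts.length : Int) - 1) = ((ts.length - 1 : Nat) : Int) := by omega
  rw [altVariants_eq ts]
  rw [hcast, PySem.List.pyRange_zero_natCast, List.foldl_map]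
  simp only []
  rw [PySem.List.foldl_append_singleton_eq_map]
  rw [List.nil_append]
  refine List.map_congr_left (fun k hk => ?_)
  rw [List.mem_range] at hk
  -- the separator list: ["."]*(len-1) with position k set to "@"
  rw [show List.map (fun _ => (".":String)) (List.map (fun k => ((k:Nat) : Int)) (List.range (ts.length - 1)))
        = List.replicate (ts.length - 1) "." by simp [Function.comp_def, List.map_const']]
  rw [show PySem.List.pySetD (List.replicate (ts.length - 1) ".") (k : Int) "@"
        = (List.replicate (ts.length - 1) ".").set k "@" by
      rw [PySem.List.pySetD, PySem.List.pySet?_natCast _ _ _ (by simpa using hk)]; rfl]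
  rw [show ((((List.replicate (ts.length - 1) ".").set k "@").length : Int))
        = ((ts.length - 1 : Nat) : Int) by simp]
  rw [PySem.List.pyRange_zero_natCast, List.foldl_map]
  simp only [PySem.List.pyGetD_natCast]
  rw [PySem.List.foldl_congr_mem _ _
      (fun s j => s ++ (ts.getD j "" ++ (if j = k then "@" else "."))) _
      (fun acc j hj => by
        rw [List.mem_range] at hj
        rw [midGetD _ _ hk _ hj, String.append_assoc])]
  rw [pyGetD_neg_one ts hts]
  rw [coreFold k ts "" hts hk]
  exact String.empty_append

-- ===== VERDICT (by name: the statement is the Claim_ definition above) =====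
theorem email_tokenier_spec : Claim_equal_email_tokenier := by
  intro word _
  show email_tokenier word = email_tokenier_alt word
  rw [email_tokenier, email_tokenier_alt]
  by_cases h : ((PySem.Chars.splitOn word.toList "@".toList).map String.ofList).length ≤ 2
  · simp only [if_pos h]
  · simp only [if_neg h]
    exact outer_eq _ (by omega)
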